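-- pv_equiv track=rewrite | github.com/winstonmeng/coding-class | thirty_one_game.py | compute_ai_move
-- ===== SOURCE A (Python) =====
-- MAX_PER_TURN = 3
--
-- LOSING_TARGET = 31
--
-- SAFE_RESIDUE = (LOSING_TARGET - 1) % (MAX_PER_TURN + 1)  # 2 for 31 game with 1-3 numbers
--
-- def compute_ai_move(current_total: int) -> list[int]:
-- 	"""
-- 	Return the sequence of numbers the AI will say this turn.
-- 	AI plays optimally to force the opponent to eventually say LOSING_TARGET when possible.
-- 	"""
-- 	# Next target that is congruent to SAFE_RESIDUE mod (MAX_PER_TURN+1)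
-- 	next_target = None
-- 	for step in range(1, MAX_PER_TURN + 1):
-- 		candidate = current_total + step
-- 		if candidate % (MAX_PER_TURN + 1) == SAFE_RESIDUE and candidate < LOSING_TARGET:
-- 			next_target = candidate
-- 			break
--
-- 	# If we can move to the next safe target, do so; else pick minimal safe-ish move
-- 	if next_target is not None:
-- 		end_number = next_target
-- 	else:
-- 		# If we're already on a safe number (rare if opponent plays well),
-- 		# no move can keep us on safe; choose 1 to minimize advantage given.
-- 		end_number = min(current_total + 1, LOSING_TARGET)
--
-- 	return list(range(current_total + 1, end_number + 1))
-- ===== SOURCE B (Python) =====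
-- MAX_PER_TURN = 3
--
-- LOSING_TARGET = 31
--
-- SAFE_RESIDUE = (LOSING_TARGET - 1) % (MAX_PER_TURN + 1)
--
-- def compute_ai_move(current_total: int) -> list[int]:
-- 	"""
-- 	Return the sequence of numbers the AI will say this turn.
-- 	Closed-form: the distance to the next safe total is (SAFE_RESIDUE - current_total)
-- 	modulo (MAX_PER_TURN + 1); step 0 means no reachable safe total this turn.
-- 	"""
-- 	step = (SAFE_RESIDUE - current_total) % (MAX_PER_TURN + 1)
-- 	if step != 0 and current_total + step < LOSING_TARGET:
-- 		end_number = current_total + step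
-- 	else:
-- 		end_number = min(current_total + 1, LOSING_TARGET)
-- 	return list(range(current_total + 1, end_number + 1))
-- ===== Notes on version B (the rewrite author's own statement) =====
-- stated objective: simpler
-- what changed: Replaces the step-search loop over 1..MAX_PER_TURN with a direct modular computation of the distance to the next safe total.
import Mathlib
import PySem

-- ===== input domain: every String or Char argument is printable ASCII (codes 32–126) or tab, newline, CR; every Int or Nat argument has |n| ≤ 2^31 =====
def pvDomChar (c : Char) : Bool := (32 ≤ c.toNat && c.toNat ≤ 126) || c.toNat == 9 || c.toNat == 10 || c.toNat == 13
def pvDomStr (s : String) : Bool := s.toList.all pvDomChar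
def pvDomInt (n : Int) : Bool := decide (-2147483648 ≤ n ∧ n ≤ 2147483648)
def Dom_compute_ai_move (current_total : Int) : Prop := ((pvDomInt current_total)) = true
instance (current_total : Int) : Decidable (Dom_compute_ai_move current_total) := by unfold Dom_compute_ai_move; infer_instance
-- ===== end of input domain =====

-- B replaces A's step-search loop with a closed-form modular step; objective: simpler.

-- ===== PORT A =====
-- the for-loop with break: scan steps, return the first safe candidate
def pvFindTarget (steps : List Int) (current_total : Int) : Option Int :=
  match steps with
  | [] => none
  | s :: rest =>
    let candidate := current_total + s
    if PySem.Int.mod candidate (3 + 1) = 2 ∧ candidate < 31 then some candidate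
    else pvFindTarget rest current_total

def compute_ai_move (current_total : Int) : List Int :=
  let next_target := pvFindTarget (PySem.List.pyRange 1 (3 + 1) 1) current_total
  let end_number :=
    match next_target with
    | some c => c
    | none => min (current_total + 1) 31
  PySem.List.pyRange (current_total + 1) (end_number + 1) 1

-- ===== PORT B =====
def compute_ai_move_alt (current_total : Int) : List Int :=
  let step := PySem.Int.mod (2 - current_total) (3 + 1)
  let end_number :=
    if step ≠ 0 ∧ current_total + step < 31 then current_total + step
    else min (current_total + 1) 31
  PySem.List.pyRange (current_total + 1) (end_number + 1) 1

-- ===== PRECONDITION & SPEC =====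
def Spec_compute_ai_move (current_total : Int) (out : List Int) : Prop := out = compute_ai_move_alt current_total
instance (current_total : Int) (out : List Int) : Decidable (Spec_compute_ai_move current_total out) := by unfold Spec_compute_ai_move; infer_instance

-- ===== CLAIM (what is proved, stated in full; the proofs are below) =====
def Claim_equal_compute_ai_move : Prop := ∀ (current_total : Int), Dom_compute_ai_move current_total → Spec_compute_ai_move current_total (compute_ai_move current_total)

-- ===== LEMMAS AND PROOFS =====

-- ===== VERDICT (by name: the statement is the Claim_ definition above) =====
theorem compute_ai_move_spec : Claim_equal_compute_ai_move := by
  intro t _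
  unfold Spec_compute_ai_move compute_ai_move compute_ai_move_alt
  have hr : PySem.List.pyRange 1 (3 + 1) 1 = [1, 2, 3] := by decide
  rw [hr]
  simp only [pvFindTarget]
  simp only [PySem.Int.mod_eq_emod_of_pos (show (0:Int) < 3 + 1 by omega)]
  split_ifs <;> first
    | rfl
    | omega
    | (congr 1; simp only []; omega)
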